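-- pv_equiv track=rewrite | github.com/wholien/bikei | bikei.py | abq
-- ===== SOURCE A (Python) =====
-- def zeromatrix(n):
--     ### return n by n zero matrix###
--     out = []
--     for i in range(0,n):
--         r = []
--         for j in range(0,n): r.append(0)
--         out.append(r)
--     return out
--
-- def abq(n,s,t):
--     ###Alexander biquandle Z_n###
--     U,L=zeromatrix(n),zeromatrix(n)
--     for i in range(1,n+1):
--        for j in range(1,n+1):
--            U[i-1][j-1] = (t*i+(s-s)*j) %n
--            L[i-1][j-1] = (s*i %n)
--     for i in range(1,n+1):
--        for j in range(1,n+1):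
--            if U[i-1][j-1] == 0: U[i-1][j-1] = n
--            if L[i-1][j-1] == 0: L[i-1][j-1] = n
--     return([U,L])
-- ===== SOURCE B (Python) =====
-- def abq(n, s, t):
--     U, L = [], []
--     for i in range(1, n + 1):
--         u = (t * i) % n or n
--         l = (s * i) % n or n
--         U.append([u] * n)
--         L.append([l] * n)
--     return [U, L]
-- ===== Notes on version B (the rewrite author's own statement) =====
-- stated objective: simpler
-- what changed: Each row of both matrices is constant (the (s-s)*j term is always 0), so B builds every row by scalar replication ([u]*n) in a single loop over i, replacing A's zero-matrix allocation plus two separate full n*n element-by-element passes (fill, then 0-to-n fix).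
import Mathlib
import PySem

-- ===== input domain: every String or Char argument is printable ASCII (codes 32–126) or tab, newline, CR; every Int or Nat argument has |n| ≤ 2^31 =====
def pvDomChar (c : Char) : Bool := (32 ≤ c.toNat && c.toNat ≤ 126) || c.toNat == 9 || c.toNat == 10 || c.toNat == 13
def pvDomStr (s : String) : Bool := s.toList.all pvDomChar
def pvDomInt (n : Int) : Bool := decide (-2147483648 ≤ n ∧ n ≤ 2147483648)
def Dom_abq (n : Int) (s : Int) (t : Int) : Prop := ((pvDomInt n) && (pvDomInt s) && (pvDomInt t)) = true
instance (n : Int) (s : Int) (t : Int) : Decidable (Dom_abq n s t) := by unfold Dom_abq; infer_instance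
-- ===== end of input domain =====

-- B builds each (constant) row by scalar replication in one loop over i, replacing A's
-- zero-matrix allocation plus two full n×n passes (fill, then 0→n fix); objective: simpler.

-- ===== PORT A =====
def zeromatrix (n : Int) : List (List Int) :=
  (PySem.List.pyRange 0 n).foldl
    (fun out _ =>
      out ++ [(PySem.List.pyRange 0 n).foldl (fun r _ => r ++ [(0 : Int)]) []]) []

def abq (n : Int) (s : Int) (t : Int) : List (List (List Int)) :=
  let UL0 := (zeromatrix n, zeromatrix n)
  let filled := (PySem.List.pyRange 1 (n + 1)).foldl (fun UL i =>
    (PySem.List.pyRange 1 (n + 1)).foldl (fun UL j =>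
      (PySem.List.pySetD UL.1 (i - 1)
         (PySem.List.pySetD (PySem.List.pyGetD UL.1 (i - 1) []) (j - 1)
           (PySem.Int.mod (t * i + (s - s) * j) n)),
       PySem.List.pySetD UL.2 (i - 1)
         (PySem.List.pySetD (PySem.List.pyGetD UL.2 (i - 1) []) (j - 1)
           (PySem.Int.mod (s * i) n)))) UL) UL0
  let fixed := (PySem.List.pyRange 1 (n + 1)).foldl (fun UL i =>
    (PySem.List.pyRange 1 (n + 1)).foldl (fun UL j =>
      ((if PySem.List.pyGetD (PySem.List.pyGetD UL.1 (i - 1) []) (j - 1) 0 = 0 then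
          PySem.List.pySetD UL.1 (i - 1)
            (PySem.List.pySetD (PySem.List.pyGetD UL.1 (i - 1) []) (j - 1) n)
        else UL.1),
       (if PySem.List.pyGetD (PySem.List.pyGetD UL.2 (i - 1) []) (j - 1) 0 = 0 then
          PySem.List.pySetD UL.2 (i - 1)
            (PySem.List.pySetD (PySem.List.pyGetD UL.2 (i - 1) []) (j - 1) n)
        else UL.2))) UL) filled
  [fixed.1, fixed.2]

-- ===== PORT B =====
def abq_alt (n : Int) (s : Int) (t : Int) : List (List (List Int)) :=
  let UL := (PySem.List.pyRange 1 (n + 1)).foldl (fun UL i =>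
    let u0 := PySem.Int.mod (t * i) n
    let u := if u0 = 0 then n else u0
    let l0 := PySem.Int.mod (s * i) n
    let l := if l0 = 0 then n else l0
    (UL.1 ++ [List.replicate n.toNat u], UL.2 ++ [List.replicate n.toNat l]))
    ([], [])
  [UL.1, UL.2]

-- ===== PRECONDITION & SPEC =====
def Spec_abq (n : Int) (s : Int) (t : Int) (out : List (List (List Int))) : Prop := out = abq_alt n s t
instance (n : Int) (s : Int) (t : Int) (out : List (List (List Int))) : Decidable (Spec_abq n s t out) := by unfold Spec_abq; infer_instance

-- ===== CLAIM (what is proved, stated in full; the proofs are below) =====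
def Claim_equal_abq : Prop := ∀ (n : Int) (s : Int) (t : Int), Dom_abq n s t → Spec_abq n s t (abq n s t)

-- ===== LEMMAS AND PROOFS =====

-- Python ranges as Nat ranges (valid for every Int n, including n ≤ 0, where both sides are []).
lemma pyRange_one_natSucc : ∀ (N : Nat),
    PySem.List.pyRange 1 ((N : Int) + 1) = (List.range N).map (fun (k : Nat) => (k : Int) + 1) := by
  intro N
  induction N with
  | zero =>
    simp only [List.range_zero, List.map_nil, Nat.cast_zero]
    apply List.eq_nil_iff_forall_not_mem.mpr
    intro x hx
    rw [PySem.List.mem_pyRange_one] at hx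
    omega
  | succ N ih =>
    rw [show (((N + 1 : Nat) : Int) + 1) = (((N : Int) + 1) + 1) by push_cast; ring,
        PySem.List.pyRange_one_succ_right (by omega : (1 : Int) ≤ (N : Int) + 1), ih,
        List.range_succ, List.map_append]
    simp

lemma pyRange_one_ofInt (n : Int) :
    PySem.List.pyRange 1 (n + 1) = (List.range n.toNat).map (fun (k : Nat) => (k : Int) + 1) := by
  rcases (by omega : n ≤ 0 ∨ 0 < n) with h | h
  · rw [Int.toNat_of_nonpos h]
    simp only [List.range_zero, List.map_nil]
    apply List.eq_nil_iff_forall_not_mem.mpr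
    intro x hx
    rw [PySem.List.mem_pyRange_one] at hx
    omega
  · conv_lhs => rw [show n = (n.toNat : Int) from (Int.toNat_of_nonneg h.le).symm]
    exact pyRange_one_natSucc n.toNat

lemma pyRange_zero_ofInt (n : Int) :
    PySem.List.pyRange 0 n = (List.range n.toNat).map (fun (k : Nat) => (k : Int)) := by
  rcases (by omega : 0 ≤ n ∨ n < 0) with h | h
  · conv_lhs => rw [show n = (n.toNat : Int) from (Int.toNat_of_nonneg h).symm,
      PySem.List.pyRange_zero_natCast]
  · rw [Int.toNat_of_nonpos h.le]
    simp only [List.range_zero, List.map_nil]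
    apply List.eq_nil_iff_forall_not_mem.mpr
    intro x hx
    rw [PySem.List.mem_pyRange_one] at hx
    omega

lemma zeromatrix_eq (n : Int) :
    zeromatrix n = List.replicate n.toNat (List.replicate n.toNat 0) := by
  unfold zeromatrix
  rw [PySem.List.foldl_append_singleton_eq_map, PySem.List.foldl_append_singleton_eq_map]
  simp [pyRange_zero_ofInt, Function.comp_def, List.map_const']

-- A fold whose every step only rewrites row k collapses to a single update of row k.
lemma foldl_set_row {α : Type} (k : Nat) (g : List Int → α → List Int)
    (F : List (List Int) → α → List (List Int))
    (hF : ∀ M x, k < M.length → F M x = M.set k (g (M.getD k []) x)) :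
    ∀ (l : List α) (M : List (List Int)), k < M.length →
      l.foldl F M = M.set k (l.foldl g (M.getD k [])) := by
  intro l
  induction l with
  | nil =>
    intro M hk
    rw [List.foldl_nil, List.foldl_nil, List.getD_eq_getElem _ _ hk, List.set_getElem_self hk]
  | cons x l ih =>
    intro M hk
    have hk' : k < (M.set k (g (M.getD k []) x)).length := by rw [List.length_set]; exact hk
    have hrow : (M.set k (g (M.getD k []) x)).getD k [] = g (M.getD k []) x := by
      rw [List.getD_eq_getElem _ _ hk']
      simp
    rw [List.foldl_cons, hF M x hk, ih _ hk', hrow, List.set_set, List.foldl_cons]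

-- A fold over Python row indices i = 1..m that replaces row i-1 by a function of its old value is a map.
lemma foldl_set_mat (g : Nat → List Int → List Int)
    (F : List (List Int) → Int → List (List Int))
    (hF : ∀ (M : List (List Int)) (k : Nat), k < M.length →
      F M ((k : Int) + 1) = M.set k (g k (M.getD k []))) :
    ∀ (m : Nat) (M : List (List Int)), m ≤ M.length →
      ((List.range m).map (fun (k : Nat) => (k : Int) + 1)).foldl F M
        = (List.range m).map (fun (k : Nat) => g k (M.getD k [])) ++ M.drop m := by
  intro m
  induction m with
  | zero => intro M _; simp
  | succ m ih =>
    intro M hm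
    have hmlt : m < M.length := by omega
    rw [List.range_succ, List.map_append, List.foldl_append, ih M (by omega)]
    simp only [List.map_cons, List.map_nil, List.foldl_cons, List.foldl_nil]
    set P := (List.range m).map (fun (k : Nat) => g k (M.getD k [])) with hP
    have hPlen : P.length = m := by simp [hP]
    have hdrop : M.drop m = M[m] :: M.drop (m + 1) := List.drop_eq_getElem_cons hmlt
    have hlen : m < (P ++ M.drop m).length := by
      rw [List.length_append, hPlen, List.length_drop]
      omega
    rw [hF _ m hlen]
    have hget : (P ++ M.drop m).getD m [] = M[m] := by
      rw [List.getD_append_right _ _ _ _ (by omega), hPlen, Nat.sub_self, hdrop]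
      rfl
    rw [hget, List.set_append, if_neg (by omega), hPlen, Nat.sub_self, hdrop, List.set_cons_zero]
    simp [hP, List.getElem?_eq_getElem hmlt]

-- A's fill pass on one row: writing a constant into cells j-1 for j = 1..m.
lemma foldl_row_fill (c : Int) :
    ∀ (m : Nat) (r : List Int), m ≤ r.length →
      ((List.range m).map (fun (k : Nat) => (k : Int) + 1)).foldl
          (fun r j => PySem.List.pySetD r (j - 1) c) r
        = List.replicate m c ++ r.drop m := by
  intro m
  induction m with
  | zero => intro r _; simp
  | succ m ih =>
    intro r hm
    rw [List.range_succ, List.map_append, List.foldl_append, ih r (by omega)]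
    simp only [List.map_cons, List.map_nil, List.foldl_cons, List.foldl_nil]
    rw [add_sub_cancel_right, PySem.List.pySetD_of_nonneg _ _ (Int.natCast_nonneg m),
        Int.toNat_natCast]
    rw [List.set_append, if_neg (by simp), List.length_replicate, Nat.sub_self,
        List.drop_eq_getElem_cons (by omega : m < r.length), List.set_cons_zero,
        List.replicate_succ', List.append_assoc]
    rfl

-- A's 0→n fix pass on a constant row.
lemma foldl_row_fix (v c : Int) :
    ∀ (m N : Nat), m ≤ N →
      ((List.range m).map (fun (k : Nat) => (k : Int) + 1)).foldl
          (fun r j => if PySem.List.pyGetD r (j - 1) 0 = 0 then PySem.List.pySetD r (j - 1) v else r)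
          (List.replicate N c)
        = List.replicate m (if c = 0 then v else c) ++ List.replicate (N - m) c := by
  intro m
  induction m with
  | zero => intro N _; simp
  | succ m ih =>
    intro N hm
    rw [List.range_succ, List.map_append, List.foldl_append, ih N (by omega)]
    simp only [List.map_cons, List.map_nil, List.foldl_cons, List.foldl_nil]
    rw [add_sub_cancel_right, PySem.List.pyGetD_of_nonneg _ _ (Int.natCast_nonneg m),
        PySem.List.pySetD_of_nonneg _ _ (Int.natCast_nonneg m), Int.toNat_natCast]
    have hsplit : N - m = (N - (m + 1)) + 1 := by omega
    rw [hsplit, List.replicate_succ]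
    have hget : (List.replicate m (if c = 0 then v else c)
        ++ c :: List.replicate (N - (m + 1)) c).getD m 0 = c := by
      rw [List.getD_append_right _ _ _ _ (by simp), List.length_replicate, Nat.sub_self]
      rfl
    rw [hget]
    by_cases hc : c = 0
    · rw [if_pos hc, List.set_append, if_neg (by simp), List.length_replicate, Nat.sub_self,
          List.set_cons_zero, List.replicate_succ', List.append_assoc]
      simp [hc]
    · rw [if_neg hc]
      simp only [if_neg hc]
      rw [List.replicate_succ', List.append_assoc]
      rfl

-- Both passes of A on one matrix: fill row i-1 with the constant c i, then apply the 0→v fix.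
lemma phase_all (N : Nat) (v : Int) (c : Int → Int) :
    ((List.range N).map (fun (k : Nat) => (k : Int) + 1)).foldl
        (fun M i => ((List.range N).map (fun (k : Nat) => (k : Int) + 1)).foldl
          (fun M' j =>
            if PySem.List.pyGetD (PySem.List.pyGetD M' (i - 1) []) (j - 1) 0 = 0 then
              PySem.List.pySetD M' (i - 1)
                (PySem.List.pySetD (PySem.List.pyGetD M' (i - 1) []) (j - 1) v)
            else M') M)
        (((List.range N).map (fun (k : Nat) => (k : Int) + 1)).foldl
          (fun M i => ((List.range N).map (fun (k : Nat) => (k : Int) + 1)).foldl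
            (fun M' j =>
              PySem.List.pySetD M' (i - 1)
                (PySem.List.pySetD (PySem.List.pyGetD M' (i - 1) []) (j - 1) (c i))) M)
          (List.replicate N (List.replicate N 0)))
      = (List.range N).map
          (fun (k : Nat) => List.replicate N (if c ((k : Int) + 1) = 0 then v else c ((k : Int) + 1))) := by
  have hfill : (((List.range N).map (fun (k : Nat) => (k : Int) + 1)).foldl
        (fun M i => ((List.range N).map (fun (k : Nat) => (k : Int) + 1)).foldl
          (fun M' j =>
            PySem.List.pySetD M' (i - 1)
              (PySem.List.pySetD (PySem.List.pyGetD M' (i - 1) []) (j - 1) (c i))) M)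
        (List.replicate N (List.replicate N 0)))
      = (List.range N).map (fun (k : Nat) => List.replicate N (c ((k : Int) + 1))) := by
    rw [foldl_set_mat
          (fun k r => ((List.range N).map (fun (k' : Nat) => (k' : Int) + 1)).foldl
            (fun r j => PySem.List.pySetD r (j - 1) (c ((k : Int) + 1))) r) _
          (fun M k hk => by
            simp only [add_sub_cancel_right,
              PySem.List.pySetD_of_nonneg _ _ (Int.natCast_nonneg k),
              PySem.List.pyGetD_of_nonneg _ _ (Int.natCast_nonneg k), Int.toNat_natCast]
            exact foldl_set_row k
              (fun r j => PySem.List.pySetD r (j - 1) (c ((k : Int) + 1))) _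
              (fun M' x hx => rfl) _ M hk)
          N _ (by simp)]
    rw [List.drop_eq_nil_of_le (by simp), List.append_nil]
    apply List.map_congr_left
    intro k hk
    have hk' : k < N := List.mem_range.mp hk
    rw [List.getD_eq_getElem _ _ (by simpa using hk'), List.getElem_replicate,
        foldl_row_fill (c ((k : Int) + 1)) N _ (by simp),
        List.drop_eq_nil_of_le (by simp), List.append_nil]
  rw [hfill]
  rw [foldl_set_mat
        (fun k r => ((List.range N).map (fun (k' : Nat) => (k' : Int) + 1)).foldl
          (fun r j => if PySem.List.pyGetD r (j - 1) 0 = 0 then PySem.List.pySetD r (j - 1) v else r) r) _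
        (fun M k hk => by
          simp only [add_sub_cancel_right,
            PySem.List.pySetD_of_nonneg _ _ (Int.natCast_nonneg k),
            PySem.List.pyGetD_of_nonneg _ _ (Int.natCast_nonneg k), Int.toNat_natCast]
          exact foldl_set_row k
            (fun r j => if PySem.List.pyGetD r (j - 1) 0 = 0 then PySem.List.pySetD r (j - 1) v else r) _
            (fun M' x hx => by
              dsimp only
              split_ifs with h
              · rfl
              · rw [List.getD_eq_getElem _ _ hx]
                exact (List.set_getElem_self hx).symm) _ M hk)
        N _ (by simp)]
  rw [List.drop_eq_nil_of_le (by simp), List.append_nil]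
  apply List.map_congr_left
  intro k hk
  have hk' : k < N := List.mem_range.mp hk
  rw [List.getD_eq_getElem _ _ (by simpa using hk')]
  simp only [List.getElem_map, List.getElem_range]
  rw [foldl_row_fix v (c ((k : Int) + 1)) N N le_rfl, Nat.sub_self]
  simp

-- Splitting a pair-state nested fold into its two component folds.
lemma foldl2_prod {α β σ₁ σ₂ : Type} (f : σ₁ → α → β → σ₁) (g : σ₂ → α → β → σ₂)
    (lo : List α) (li : List β) (a : σ₁) (b : σ₂) :
    lo.foldl (fun p x => li.foldl (fun q y => (f q.1 x y, g q.2 x y)) p) (a, b)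
      = (lo.foldl (fun u x => li.foldl (fun u' y => f u' x y) u) a,
         lo.foldl (fun v x => li.foldl (fun v' y => g v' x y) v) b) := by
  induction lo generalizing a b with
  | nil => rfl
  | cons x lo ih =>
    simp only [List.foldl_cons]
    rw [PySem.List.foldl_prod_mk (fun u' y => f u' x y) (fun v' y => g v' x y) li a b, ih]

lemma abq_eq_canon (n s t : Int) :
    abq n s t =
      [(List.range n.toNat).map
          (fun (k : Nat) => List.replicate n.toNat
            (if PySem.Int.mod (t * ((k : Int) + 1)) n = 0 then n
             else PySem.Int.mod (t * ((k : Int) + 1)) n)),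
       (List.range n.toNat).map
          (fun (k : Nat) => List.replicate n.toNat
            (if PySem.Int.mod (s * ((k : Int) + 1)) n = 0 then n
             else PySem.Int.mod (s * ((k : Int) + 1)) n))] := by
  unfold abq
  simp only [zeromatrix_eq, pyRange_one_ofInt, sub_self, zero_mul, add_zero]
  rw [foldl2_prod
        (fun U (i j : Int) => PySem.List.pySetD U (i - 1)
          (PySem.List.pySetD (PySem.List.pyGetD U (i - 1) []) (j - 1) (PySem.Int.mod (t * i) n)))
        (fun L (i j : Int) => PySem.List.pySetD L (i - 1)
          (PySem.List.pySetD (PySem.List.pyGetD L (i - 1) []) (j - 1) (PySem.Int.mod (s * i) n)))]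
  rw [foldl2_prod
        (fun U (i j : Int) =>
          if PySem.List.pyGetD (PySem.List.pyGetD U (i - 1) []) (j - 1) 0 = 0 then
            PySem.List.pySetD U (i - 1)
              (PySem.List.pySetD (PySem.List.pyGetD U (i - 1) []) (j - 1) n)
          else U)
        (fun L (i j : Int) =>
          if PySem.List.pyGetD (PySem.List.pyGetD L (i - 1) []) (j - 1) 0 = 0 then
            PySem.List.pySetD L (i - 1)
              (PySem.List.pySetD (PySem.List.pyGetD L (i - 1) []) (j - 1) n)
          else L)]
  rw [phase_all n.toNat n (fun i => PySem.Int.mod (t * i) n),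
      phase_all n.toNat n (fun i => PySem.Int.mod (s * i) n)]

lemma abq_alt_eq_canon (n s t : Int) :
    abq_alt n s t =
      [(List.range n.toNat).map
          (fun (k : Nat) => List.replicate n.toNat
            (if PySem.Int.mod (t * ((k : Int) + 1)) n = 0 then n
             else PySem.Int.mod (t * ((k : Int) + 1)) n)),
       (List.range n.toNat).map
          (fun (k : Nat) => List.replicate n.toNat
            (if PySem.Int.mod (s * ((k : Int) + 1)) n = 0 then n
             else PySem.Int.mod (s * ((k : Int) + 1)) n))] := by
  unfold abq_alt
  simp only [pyRange_one_ofInt]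
  rw [PySem.List.foldl_prod_mk
        (fun U (i : Int) => U ++ [List.replicate n.toNat
          (if PySem.Int.mod (t * i) n = 0 then n else PySem.Int.mod (t * i) n)])
        (fun L (i : Int) => L ++ [List.replicate n.toNat
          (if PySem.Int.mod (s * i) n = 0 then n else PySem.Int.mod (s * i) n)])]
  rw [PySem.List.foldl_append_singleton_eq_map, PySem.List.foldl_append_singleton_eq_map]
  simp [List.map_map, Function.comp]

-- ===== VERDICT (by name: the statement is the Claim_ definition above) =====
theorem abq_spec : Claim_equal_abq := by
  intro n s t _
  unfold Spec_abq
  rw [abq_eq_canon, abq_alt_eq_canon]
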